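-- pv_equiv track=rewrite | github.com/Carlos200200/Algorithms-Examples | BinaryBinaryExpansion.py | true_binary
-- ===== SOURCE A (Python) =====
-- import math
-- import math
--
-- def true_binary(n):
--
--     # Got the first n<2^x
--     Pos = int(math.log2(n))
--     L = []
--
--     Res = n
--     for x in range(Pos, -1, -1):
--         if Res > 0:
--             L.append(1)
--             Res -= (2**x)
--         else:
--             L.append(-1)
--             Res += (2**x)
--
--     return L
-- ===== SOURCE B (Python) =====
-- import math
--
--
-- def true_binary(n):
--     pos = int(math.log2(n))
--     s = (2 ** (pos + 1) - 1 + n) // 2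
--     return [1 if (s // 2 ** x) % 2 == 1 else -1 for x in range(pos, -1, -1)]
-- ===== Notes on version B (the rewrite author's own statement) =====
-- stated objective: alternative
-- what changed: Replaces the greedy residual loop (append 1/-1 and add or subtract 2**x from a running residue) by one closed-form integer s = (2**(pos+1)-1+n)//2 whose plain binary bits, read from position pos down to 0, are mapped directly to 1/-1.
-- outside the precondition, e.g. on true_binary(0): A raises ValueError, B raises ValueError; on true_binary(-1): A raises ValueError, B raises ValueError
import Mathlib
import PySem

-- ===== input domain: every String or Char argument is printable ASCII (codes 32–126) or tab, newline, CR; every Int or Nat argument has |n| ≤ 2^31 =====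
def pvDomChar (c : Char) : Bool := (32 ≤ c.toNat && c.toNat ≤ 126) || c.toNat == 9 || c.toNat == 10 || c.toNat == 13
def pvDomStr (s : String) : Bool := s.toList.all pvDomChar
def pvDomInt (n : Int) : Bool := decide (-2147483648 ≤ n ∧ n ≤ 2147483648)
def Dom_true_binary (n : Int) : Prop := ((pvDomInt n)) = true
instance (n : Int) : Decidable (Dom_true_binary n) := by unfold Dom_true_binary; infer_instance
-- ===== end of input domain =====

-- B replaces A's greedy residual loop by one closed-form integer s = (2^(pos+1)-1+n)//2 whose
-- binary bits, read from pos down to 0, are mapped directly to 1/-1 (objective: alternative).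

-- ===== PORT A =====
-- int(math.log2(n)) = ⌊log₂ n⌋ = Nat.log2 n.toNat for every 1 ≤ n ≤ 2^31 (double log2 is
-- accurate enough there; checked against CPython), so it is ported as Nat.log2.
def true_binary (n : Int) : List Int :=
  let pos : Int := (Nat.log2 n.toNat : Int)
  ((PySem.List.pyRange pos (-1) (-1)).foldl
    (fun st x =>
      if st.2 > 0 then (st.1 ++ [(1 : Int)], st.2 - 2 ^ x.toNat)
      else (st.1 ++ [(-1 : Int)], st.2 + 2 ^ x.toNat))
    ([], n)).1

-- ===== PORT B =====
def true_binary_alt (n : Int) : List Int :=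
  let pos : Int := (Nat.log2 n.toNat : Int)
  let s : Int := PySem.Int.floordiv (2 ^ (pos + 1).toNat - 1 + n) 2
  (PySem.List.pyRange pos (-1) (-1)).map
    (fun x => if PySem.Int.mod (PySem.Int.floordiv s (2 ^ x.toNat)) 2 = 1 then (1 : Int) else -1)

-- ===== PRECONDITION & SPEC =====
-- Pre_ excludes n ≤ 0, where math.log2 raises ValueError in A (and in B alike).
def Pre_true_binary (n : Int) : Prop := 1 ≤ n
instance (n : Int) : Decidable (Pre_true_binary n) := by unfold Pre_true_binary; infer_instance
def pvWitness_true_binary : Int := (6)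

def Spec_true_binary (n : Int) (out : List Int) : Prop := out = true_binary_alt n
instance (n : Int) (out : List Int) : Decidable (Spec_true_binary n out) := by unfold Spec_true_binary; infer_instance

-- ===== CLAIM (what is proved, stated in full; the proofs are below) =====
def Claim_equal_true_binary : Prop := ∀ (n : Int), Dom_true_binary n → Pre_true_binary n → Spec_true_binary n (true_binary n)

-- ===== LEMMAS AND PROOFS =====

-- range(pos, -1, -1) is [pos, pos-1, …, 0]
lemma pyRange_down (p : ℕ) :
    PySem.List.pyRange (p : ℤ) (-1) (-1)
      = (List.range (p + 1)).map (fun (k : ℕ) => (p : ℤ) - (k : ℤ)) := by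
  simp only [PySem.List.pyRange]
  norm_num
  rw [if_pos (by omega : (-1:ℤ) < (p:ℤ))]
  refine List.map_congr_left fun k _ => by ring

lemma exps_succ (x : ℕ) :
    (List.range (x + 2)).map (fun (k : ℕ) => ((x + 1 : ℕ) : ℤ) - (k : ℤ))
      = ((x + 1 : ℕ) : ℤ) :: (List.range (x + 1)).map (fun (k : ℕ) => (x : ℤ) - (k : ℤ)) := by
  rw [List.range_succ_eq_map, List.map_cons, List.map_map]
  refine congrArg₂ _ (by push_cast; ring) ?_
  refine List.map_congr_left fun k _ => ?_
  simp only [Function.comp_apply, Nat.succ_eq_add_one]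
  push_cast
  ring

-- a bit strictly below an added multiple of 2*P is unchanged
lemma bit_stable (s t P : ℤ) (hP : 0 < P) :
    PySem.Int.mod (PySem.Int.floordiv (s + 2 * P * t) P) 2
      = PySem.Int.mod (PySem.Int.floordiv s P) 2 := by
  rw [PySem.Int.floordiv_eq_ediv_of_pos hP, PySem.Int.floordiv_eq_ediv_of_pos hP]
  rw [show s + 2 * P * t = s + (2 * t) * P from by ring,
      Int.add_mul_ediv_right _ _ (by omega : P ≠ 0)]
  rw [PySem.Int.mod_eq_emod_of_pos (by norm_num), PySem.Int.mod_eq_emod_of_pos (by norm_num)]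
  omega

-- bit_stable with the added quantity given by an equation (for targeted rewriting)
lemma bit_stable2 (s Q t P : ℤ) (hP : 0 < P) (hQ : Q = 2 * P * t) :
    PySem.Int.mod (PySem.Int.floordiv (s + Q) P) 2
      = PySem.Int.mod (PySem.Int.floordiv s P) 2 := by
  rw [hQ]
  exact bit_stable s t P hP

lemma bit_one (s P : ℤ) (hP : 0 < P) (h1 : P ≤ s) (h2 : s < 2 * P) :
    PySem.Int.mod (PySem.Int.floordiv s P) 2 = 1 := by
  have h : PySem.Int.floordiv s P = 1 :=
    (PySem.Int.floordiv_eq_iff_of_pos hP).mpr ⟨by linarith, by linarith⟩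
  rw [h]; decide

lemma bit_zero (s P : ℤ) (hP : 0 < P) (h1 : 0 ≤ s) (h2 : s < P) :
    PySem.Int.mod (PySem.Int.floordiv s P) 2 = 0 := by
  have h : PySem.Int.floordiv s P = 0 :=
    (PySem.Int.floordiv_eq_iff_of_pos hP).mpr ⟨by linarith, by linarith⟩
  rw [h]; decide

-- halving: ⌊(a + 2*b)/2⌋ = ⌊a/2⌋ + b
lemma floordiv_two_shift (a b : ℤ) :
    PySem.Int.floordiv (a + 2 * b) 2 = PySem.Int.floordiv a 2 + b := by
  rw [PySem.Int.floordiv_eq_ediv_of_pos (by norm_num),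
      PySem.Int.floordiv_eq_ediv_of_pos (by norm_num),
      show a + 2 * b = a + b * 2 from by ring,
      Int.add_mul_ediv_right _ _ (by norm_num : (2:ℤ) ≠ 0)]

-- the greedy loop writes exactly the ±1-coded bits of s = ⌊(2^(x+1)-1+Res)/2⌋, top bit first
lemma loop_eq (x : ℕ) : ∀ (acc : List Int) (Res : Int),
    -(2 ^ (x + 1)) < Res → Res ≤ 2 ^ (x + 1) →
    (((List.range (x + 1)).map (fun (k : ℕ) => (x : ℤ) - (k : ℤ))).foldl
      (fun (st : List Int × Int) (e : Int) =>
        if st.2 > 0 then (st.1 ++ [(1 : Int)], st.2 - 2 ^ e.toNat)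
        else (st.1 ++ [(-1 : Int)], st.2 + 2 ^ e.toNat)) (acc, Res)).1
    = acc ++ ((List.range (x + 1)).map (fun (k : ℕ) => (x : ℤ) - (k : ℤ))).map
        (fun e => if PySem.Int.mod (PySem.Int.floordiv
            (PySem.Int.floordiv (2 ^ (x + 1) - 1 + Res) 2) (2 ^ e.toNat)) 2 = 1
          then (1 : Int) else -1) := by
  induction x with
  | zero =>
    intro acc Res hl hr
    norm_num at hl hr
    by_cases h : Res > 0 <;> simp [h] <;> omega
  | succ x ih =>
    intro acc Res hl hr
    have hP : (0:ℤ) < 2 ^ (x + 1) := by positivity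
    have hPP : (2:ℤ) ^ (x + 1 + 1) = 2 * 2 ^ (x + 1) := by ring
    have hcast : ((x + 1 : ℕ) : ℤ).toNat = x + 1 := by omega
    rw [show (x + 1 + 1) = x + 2 from rfl, exps_succ x, List.foldl_cons, List.map_cons]
    by_cases h : Res > 0
    · -- top bit 1, residual Res - 2^(x+1)
      have hs1 : -(2 ^ (x + 1)) < Res - 2 ^ (x + 1) := by omega
      have hs2 : Res - 2 ^ (x + 1) ≤ 2 ^ (x + 1) := by nlinarith
      have hsrec : PySem.Int.floordiv (2 ^ (x + 1 + 1) - 1 + Res) 2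
          = PySem.Int.floordiv (2 ^ (x + 1) - 1 + (Res - 2 ^ (x + 1))) 2 + 2 ^ (x + 1) := by
        rw [show (2:ℤ) ^ (x + 1 + 1) - 1 + Res
              = (2 ^ (x + 1) - 1 + (Res - 2 ^ (x + 1))) + 2 * 2 ^ (x + 1) from by ring,
            floordiv_two_shift]
      have htop : PySem.Int.mod (PySem.Int.floordiv
          (PySem.Int.floordiv (2 ^ (x + 1 + 1) - 1 + Res) 2) (2 ^ (x + 1))) 2 = 1 := by
        apply bit_one _ _ hP
        · rw [PySem.Int.le_floordiv_iff_mul_le (by norm_num)]; nlinarith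
        · rw [PySem.Int.floordiv_lt_iff_lt_mul (by norm_num)]; nlinarith
      rw [if_pos h, hcast, ih _ _ hs1 hs2, htop, if_pos rfl]
      rw [List.append_assoc, List.singleton_append]
      refine congrArg _ (congrArg _ ?_)
      refine List.map_congr_left fun e he => ?_
      obtain ⟨k, hk, rfl⟩ := List.mem_map.mp he
      have hkx : k < x + 1 := List.mem_range.mp hk
      have het : ((x : ℤ) - (k : ℤ)).toNat = x - k := by omega
      have hfac : (2:ℤ) ^ (x + 1) = 2 * 2 ^ (x - k) * 2 ^ k := by
        rw [show (2:ℤ) * 2 ^ (x - k) * 2 ^ k = 2 ^ (x - k + k + 1) from by ring]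
        congr 1
        omega
      rw [het, hsrec, bit_stable2 _ _ _ _ (by positivity) hfac]
    · -- top bit 0, residual Res + 2^(x+1); s is literally unchanged
      have hs1 : -(2 ^ (x + 1)) < Res + 2 ^ (x + 1) := by nlinarith
      have hs2 : Res + 2 ^ (x + 1) ≤ 2 ^ (x + 1) := by omega
      have hsame : (2:ℤ) ^ (x + 1 + 1) - 1 + Res = 2 ^ (x + 1) - 1 + (Res + 2 ^ (x + 1)) := by ring
      have htop : PySem.Int.mod (PySem.Int.floordiv
          (PySem.Int.floordiv (2 ^ (x + 1 + 1) - 1 + Res) 2) (2 ^ (x + 1))) 2 = 0 := by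
        apply bit_zero _ _ hP
        · rw [PySem.Int.le_floordiv_iff_mul_le (by norm_num)]; nlinarith
        · rw [PySem.Int.floordiv_lt_iff_lt_mul (by norm_num)]; nlinarith
      rw [if_neg h, hcast, ih _ _ hs1 hs2, htop]
      rw [if_neg (by norm_num), List.append_assoc, List.singleton_append]
      refine congrArg _ (congrArg _ ?_)
      rw [hsame]

-- ===== VERDICT (by name: the statement is the Claim_ definition above) =====
theorem true_binary_spec : Claim_equal_true_binary := by
  intro n _ hpre
  unfold Spec_true_binary
  simp only [true_binary, true_binary_alt]
  have hn : (1:ℤ) ≤ n := hpre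
  set p : ℕ := Nat.log2 n.toNat with hp
  have hnt : n.toNat ≠ 0 := by omega
  have hlo : 2 ^ p ≤ n.toNat := Nat.log2_self_le hnt
  have hhi : n.toNat < 2 ^ (p + 1) := (Nat.log2_lt hnt).mp (by omega)
  have hcast : ((n.toNat : ℤ)) = n := by omega
  have hhiZ : n < (2:ℤ) ^ (p + 1) := by
    calc n = (n.toNat : ℤ) := hcast.symm
    _ < ((2 ^ (p + 1) : ℕ) : ℤ) := by exact_mod_cast hhi
    _ = (2:ℤ) ^ (p + 1) := by push_cast; ring
  have hposP : (0:ℤ) < 2 ^ (p + 1) := by positivity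
  have hl : -(2 ^ (p + 1)) < n := by nlinarith
  have h1 : (((p : ℤ)) + 1).toNat = p + 1 := by omega
  rw [pyRange_down p, loop_eq p [] n hl (by omega), List.nil_append, h1]
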